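-- pv_equiv track=rewrite | github.com/Mmark94/SCRaMbLE-SIM | Mapping_coverage_MM.py | count_LU_CN_multi
-- ===== SOURCE A (Python) =====
-- def count_LU_CN(Chr, Max_LU=0):
--     # make all the LU positive
--     new_chr = [abs(x) for x in Chr]
--     # generate a reference dictionary
--     LU_CN = {}
--     if Max_LU < max(new_chr):
--         Max_LU = max(new_chr)
--     for i in range(1, Max_LU+1):
--         LU_CN[i] = 0
--     # count the LU
--     for LU in new_chr:      # Note the LU should be already positive
--         LU_CN[LU] += 1
--     return LU_CN
--
-- def find_max_value(Chrs):
--     MAX = 0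
--     for Chr in Chrs:
--         new_chr = [abs(x) for x in Chr]
--         MAX_temp = max(new_chr)
--         if MAX_temp > MAX:
--             MAX = MAX_temp
--     return MAX
--
-- def count_LU_CN_multi(Chrs):
--     Max_LU = find_max_value(Chrs)
--     LU_CN_TOT = {}
--     for Chr in Chrs:
--         count_LU = count_LU_CN(Chr, Max_LU=Max_LU)
--         for key, value in count_LU.items():
--             if key not in LU_CN_TOT:
--                 LU_CN_TOT[key] = [value]
--             else:
--                 LU_CN_TOT[key].append(value)
--     return LU_CN_TOT
-- ===== SOURCE B (Python) =====
-- def count_LU_CN_multi(Chrs):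
--     # Fill a preallocated (LU x chromosome) table in place instead of building a
--     # per-chromosome dict and append-merging it into the total.
--     N = len(Chrs)
--     Max_LU = 0
--     for Chr in Chrs:
--         m = max(abs(x) for x in Chr)
--         if m > Max_LU:
--             Max_LU = m
--     LU_CN_TOT = {i: [0] * N for i in range(1, Max_LU + 1)}
--     for idx, Chr in enumerate(Chrs):
--         for x in Chr:
--             LU_CN_TOT[abs(x)][idx] += 1
--     return LU_CN_TOT
-- ===== Notes on version B (the rewrite author's own statement) =====
-- stated objective: simpler
-- what changed: Instead of building a fresh per-chromosome dict of counts and append-merging each one into the total, B preallocates the whole {LU: [0]*N} table once and fills it in place with a single pass over the chromosomes, eliminating the intermediate dicts and the merge step.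
import Mathlib
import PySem

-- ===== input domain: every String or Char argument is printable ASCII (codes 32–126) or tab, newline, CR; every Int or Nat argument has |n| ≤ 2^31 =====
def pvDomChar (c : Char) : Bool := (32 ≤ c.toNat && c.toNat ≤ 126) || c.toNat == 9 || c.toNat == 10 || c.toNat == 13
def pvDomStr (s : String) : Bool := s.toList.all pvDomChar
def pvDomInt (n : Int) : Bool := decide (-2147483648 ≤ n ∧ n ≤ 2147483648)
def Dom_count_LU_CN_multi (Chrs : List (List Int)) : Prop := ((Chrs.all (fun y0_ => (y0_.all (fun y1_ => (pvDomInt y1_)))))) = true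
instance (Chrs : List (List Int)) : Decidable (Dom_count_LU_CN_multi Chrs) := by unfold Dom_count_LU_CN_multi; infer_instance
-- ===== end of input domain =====

-- B fills a preallocated {LU: [0]*N} table in one pass instead of append-merging a fresh
-- per-chromosome count dict into the total (objective: simpler).

-- ===== PORT A =====

-- max(xs): Python raises ValueError on []; Pre_ excludes that, the 0 default is never used there
def pvMaxOf (l : List Int) : Int :=
  match PySem.List.max? l (fun y => y) with
  | some m => m
  | none => 0

-- [abs(x) for x in Chr]
def pvAbsList (Chr : List Int) : List Int := Chr.map (fun x => |x|)

-- count_LU_CN(Chr, Max_LU): LU_CN[LU] += 1 raises KeyError when LU = 0; Pre_ excludes 0 elements,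
-- so the modify default 0 is never used on admitted inputs
def count_LU_CN (Chr : List Int) (Max_LU : Int) : PySem.Dict Int Int :=
  let new_chr := pvAbsList Chr
  let Max_LU := if Max_LU < pvMaxOf new_chr then pvMaxOf new_chr else Max_LU
  let LU_CN := (PySem.List.pyRange 1 (Max_LU + 1) 1).foldl
      (fun d i => d.insert i 0) (PySem.Dict.empty : PySem.Dict Int Int)
  new_chr.foldl (fun d lu => d.modify lu 0 (fun v => v + 1)) LU_CN

def find_max_value (Chrs : List (List Int)) : Int :=
  Chrs.foldl (fun MAX Chr =>
    let MAX_temp := pvMaxOf (pvAbsList Chr)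
    if MAX_temp > MAX then MAX_temp else MAX) 0

def count_LU_CN_multi (Chrs : List (List Int)) : List (Int × List Int) :=
  let Max_LU := find_max_value Chrs
  (Chrs.foldl (fun tot Chr =>
      (count_LU_CN Chr Max_LU).items.foldl (fun tot kv =>
        if tot.contains kv.1 then tot.modify kv.1 [] (fun l => l ++ [kv.2])
        else tot.insert kv.1 [kv.2]) tot)
    (PySem.Dict.empty : PySem.Dict Int (List Int))).items

-- ===== PORT B =====

-- max(abs(x) for x in Chr): ValueError on an empty chromosome, excluded by Pre_
def pvMaxAbsB (Chr : List Int) : Int :=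
  match PySem.List.max? (Chr.map (fun x => |x|)) (fun y => y) with
  | some m => m
  | none => 0

def count_LU_CN_multi_alt (Chrs : List (List Int)) : List (Int × List Int) :=
  let N := Chrs.length
  let Max_LU := Chrs.foldl (fun mx Chr =>
      let m := pvMaxAbsB Chr
      if m > mx then m else mx) 0
  let tot := (PySem.List.pyRange 1 (Max_LU + 1) 1).foldl
      (fun d i => d.insert i (List.replicate N (0 : Int)))
      (PySem.Dict.empty : PySem.Dict Int (List Int))
  -- LU_CN_TOT[abs(x)][idx] += 1; idx = p.1 ≥ 0 from enumerate, KeyError on abs(x)=0 excluded by Pre_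
  let tot := (PySem.List.enumerate Chrs 0).foldl (fun d p =>
      p.2.foldl (fun d x =>
        d.modify (|x|) [] (fun l => l.set p.1.toNat (l.getD p.1.toNat 0 + 1))) d) tot
  tot.items

-- ===== PRECONDITION & SPEC =====
-- Pre_ excludes exactly the inputs where the Python A raises: an empty chromosome
-- (ValueError from max) or a 0 element (KeyError, since keys start at 1); B raises there too.
def Pre_count_LU_CN_multi (Chrs : List (List Int)) : Prop :=
  ∀ c ∈ Chrs, c ≠ [] ∧ ∀ x ∈ c, x ≠ 0
instance (Chrs : List (List Int)) : Decidable (Pre_count_LU_CN_multi Chrs) := by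
  unfold Pre_count_LU_CN_multi; infer_instance

def pvWitness_count_LU_CN_multi : List (List Int) := [[1, -2], [2, 3]]

def Spec_count_LU_CN_multi (Chrs : List (List Int)) (out : List (Int × List Int)) : Prop := out = count_LU_CN_multi_alt Chrs
instance (Chrs : List (List Int)) (out : List (Int × List Int)) : Decidable (Spec_count_LU_CN_multi Chrs out) := by unfold Spec_count_LU_CN_multi; infer_instance

-- ===== CLAIM (what is proved, stated in full; the proofs are below) =====
def Claim_equal_count_LU_CN_multi : Prop := ∀ (Chrs : List (List Int)), Dom_count_LU_CN_multi Chrs → Pre_count_LU_CN_multi Chrs → Spec_count_LU_CN_multi Chrs (count_LU_CN_multi Chrs)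

-- ===== LEMMAS AND PROOFS =====

-- |x| counted in a chromosome, as an Int (the common value both ports compute per cell)
def pvCnt (k : Int) (c : List Int) : Int := ((c.map (fun x => |x|)).count k : Int)

-- pvFill: the effect of B's fill loop on a single LU's row, one chromosome at a time
def pvFill (k : Int) (cs : List (List Int)) (j : Nat) (l : List Int) : List Int :=
  match cs with
  | [] => l
  | c :: rest => pvFill k rest (j + 1) (l.set j (l.getD j 0 + pvCnt k c))

lemma dict_items_empty {ν : Type} : (PySem.Dict.empty : PySem.Dict Int ν).items = [] := rfl

lemma set_update_append (s l : List Int) (hnd : l.Nodup) (h : ∀ x ∈ l, x ∉ s) :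
    PySem.Set.update s l = s ++ l := by
  induction l generalizing s with
  | nil => simp [PySem.Set.update]
  | cons a t ih =>
    have ha : a ∉ s := h a (by simp)
    have h1 : PySem.Set.update s (a :: t) = PySem.Set.update (s ++ [a]) t := by
      simp [PySem.Set.update, PySem.Set.add, PySem.Set.contains, ha]
    rw [h1, ih (s ++ [a]) (List.nodup_cons.mp hnd).2 ?_]
    · simp
    · intro x hx hmem
      rcases List.mem_append.mp hmem with hs | hs
      · exact h x (List.mem_cons_of_mem _ hx) hs
      · have hxa : x = a := by simpa using hs
        exact (List.nodup_cons.mp hnd).1 (hxa ▸ hx)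

lemma set_update_subset (s l : List Int) (h : ∀ x ∈ l, x ∈ s) :
    PySem.Set.update s l = s := by
  induction l generalizing s with
  | nil => simp [PySem.Set.update]
  | cons a t ih =>
    have ha : a ∈ s := h a (by simp)
    have h1 : PySem.Set.update s (a :: t) = PySem.Set.update s t := by
      simp [PySem.Set.update, PySem.Set.add, PySem.Set.contains, ha]
    rw [h1, ih s (fun x hx => h x (List.mem_cons_of_mem _ hx))]

lemma set_update_update (K l1 l2 : List Int) :
    PySem.Set.update (PySem.Set.update K l1) l2 = PySem.Set.update K (l1 ++ l2) := by
  simp [PySem.Set.update, List.foldl_append]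

lemma set_getD_self (l : List Int) (j : Nat) : l.set j (l.getD j 0) = l := by
  by_cases hj : j < l.length
  · rw [List.getD_eq_getElem l 0 hj]
    exact List.set_getElem_self hj
  · exact List.set_eq_of_length_le (by omega)

lemma set_append_len (pre t : List Int) (b v : Int) :
    (pre ++ b :: t).set pre.length v = pre ++ v :: t := by
  rw [List.set_append_right _ _ (Nat.le_refl _)]
  simp

lemma find_max_value_bounds (Chrs : List (List Int)) (h : ∀ c ∈ Chrs, c ≠ []) :
    0 ≤ find_max_value Chrs ∧
    ∀ c ∈ Chrs, ∀ x ∈ c, |x| ≤ find_max_value Chrs := by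
  unfold find_max_value
  rw [PySem.List.foldl_congr_mem Chrs _ (fun acc c => max acc (pvMaxOf (pvAbsList c))) 0
      (by intro acc c _; dsimp only; split_ifs <;> omega)]
  obtain ⟨h0, hmax⟩ := PySem.List.le_foldl_max_int Chrs (fun c => pvMaxOf (pvAbsList c)) 0
  refine ⟨h0, ?_⟩
  intro c hc x hx
  have hne : pvAbsList c ≠ [] := by
    simp [pvAbsList]; exact h c hc
  obtain ⟨m, hm⟩ : ∃ m, PySem.List.max? (pvAbsList c) (fun y => y) = some m := by
    cases hmm : PySem.List.max? (pvAbsList c) (fun y => y) with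
    | none => exact absurd ((PySem.List.max?_eq_none_iff _ _).mp hmm) hne
    | some m => exact ⟨m, rfl⟩
  have hxm : |x| ≤ m := PySem.List.max?_isMax hm (|x|) (by simp [pvAbsList]; exact ⟨x, hx, rfl⟩)
  have hmf : pvMaxOf (pvAbsList c) = m := by simp [pvMaxOf, hm]
  calc |x| ≤ m := hxm
    _ = pvMaxOf (pvAbsList c) := hmf.symm
    _ ≤ _ := hmax c hc

lemma A_count_items (c : List Int) (M : Int) (hne : c ≠ [])
    (hbd : ∀ x ∈ c, |x| ≤ M) (h0 : ∀ x ∈ c, x ≠ 0) :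
    (count_LU_CN c M).items
      = (PySem.List.pyRange 1 (M + 1) 1).map (fun i => (i, pvCnt i c)) := by
  have hnemap : pvAbsList c ≠ [] := by simp [pvAbsList]; exact hne
  obtain ⟨m, hm⟩ : ∃ m, PySem.List.max? (pvAbsList c) (fun y => y) = some m := by
    cases hmm : PySem.List.max? (pvAbsList c) (fun y => y) with
    | none => exact absurd ((PySem.List.max?_eq_none_iff _ _).mp hmm) hnemap
    | some m => exact ⟨m, rfl⟩
  have hmM : m ≤ M := by
    have := PySem.List.max?_mem hm
    simp only [pvAbsList, List.mem_map] at this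
    obtain ⟨x, hx, rfl⟩ := this
    exact hbd x hx
  have hMax : (if M < pvMaxOf (pvAbsList c) then pvMaxOf (pvAbsList c) else M) = M := by
    simp [pvMaxOf, hm]; omega
  simp only [count_LU_CN]
  rw [hMax]
  -- the reference dict: keys 1..M, all values 0
  set R := PySem.List.pyRange 1 (M + 1) 1 with hR
  have hRnd : R.Nodup := PySem.List.nodup_pyRange_one 1 (M + 1)
  set d0 := R.foldl (fun d i => d.insert i 0) (PySem.Dict.empty : PySem.Dict Int Int) with hd0
  have hd0items : d0.items = R.map (fun i => (i, (0 : Int))) := by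
    rw [hd0, PySem.Dict.items_foldl_insert_fresh R (fun i => i) (fun _ => (0 : Int)) _
        (by intro a _; exact PySem.Dict.contains_empty _) (by simpa using hRnd)]
    simp [dict_items_empty]
  have hd0keys : d0.keys = R := by
    simp [PySem.Dict.keys, hd0items, List.map_map, Function.comp_def]
  have hd0nd : d0.keys.Nodup := by rw [hd0keys]; exact hRnd
  set dfin := (pvAbsList c).foldl (fun d lu => d.modify lu 0 (fun v => v + 1)) d0 with hdfin
  have hfkeys : dfin.keys = R := by
    have := PySem.Dict.keys_foldl_modify_key (pvAbsList c) (fun x => x) (0 : Int)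
        (fun _ _ => (fun v => v + 1)) d0
    rw [hdfin, this, List.map_id', hd0keys, set_update_subset]
    intro y hy
    simp only [pvAbsList, List.mem_map] at hy
    obtain ⟨x, hx, rfl⟩ := hy
    rw [hR, PySem.List.mem_pyRange_one]
    have h1 := hbd x hx
    have h2 : 0 < |x| := abs_pos.mpr (h0 x hx)
    constructor <;> omega
  have hfnd : dfin.keys.Nodup := by rw [hfkeys]; exact hRnd
  rw [PySem.Dict.items_eq_map_keys dfin hfnd 0, hfkeys]
  apply List.map_eq_map_iff.mpr
  intro k hk
  have hg : dfin.getD k 0 = d0.getD k 0 + ((pvAbsList c).count k : Int) := by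
    rw [hdfin]; exact PySem.Dict.getD_foldl_modify_add_one (pvAbsList c) d0 k
  have hg0 : d0.getD k 0 = 0 := by
    apply PySem.Dict.getD_of_mem_items d0 (v := (0 : Int)) ?_ hd0nd
    rw [hd0items]
    exact List.mem_map.mpr ⟨k, hk, rfl⟩
  simp [hg, hg0, pvCnt, pvAbsList]

lemma merge_step_getD (tot : PySem.Dict Int (List Int)) (a ca : Int)
    (ha : tot.contains a = true ∨ tot.getD a ([] : List Int) = []) (x : Int) :
    (if tot.contains a then tot.modify a [] (fun v => v ++ [ca])
     else tot.insert a [ca]).getD x []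
      = if x = a then tot.getD a [] ++ [ca] else tot.getD x [] := by
  by_cases hc : tot.contains a = true
  · simp only [hc, if_true, PySem.Dict.getD_modify]
  · have hga : tot.getD a ([] : List Int) = [] := by
      rcases ha with h1 | h1
      · exact absurd h1 hc
      · exact h1
    simp only [hc, if_false, Bool.false_eq_true, PySem.Dict.getD_insert]
    split_ifs with hx
    · subst hx; simp [hga]
    · rfl

lemma merge_getD (l : List Int) (cf : Int → Int) (tot : PySem.Dict Int (List Int)) (k : Int)
    (hnd : l.Nodup)
    (h : ∀ i ∈ l, tot.contains i = true ∨ tot.getD i ([] : List Int) = []) :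
    ((l.map (fun i => (i, cf i))).foldl (fun tot kv =>
        if tot.contains kv.1 then tot.modify kv.1 [] (fun v => v ++ [kv.2])
        else tot.insert kv.1 [kv.2]) tot).getD k []
      = tot.getD k [] ++ (if k ∈ l then [cf k] else []) := by
  induction l generalizing tot with
  | nil => simp
  | cons a t ih =>
    have hna : a ∉ t := (List.nodup_cons.mp hnd).1
    have hndt : t.Nodup := (List.nodup_cons.mp hnd).2
    have hstep := merge_step_getD tot a (cf a) (h a (by simp))
    simp only [List.map_cons, List.foldl_cons]
    rw [ih _ hndt ?_]
    · rw [hstep k]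
      by_cases hk : k = a
      · subst hk
        simp [hna]
      · simp [hk, List.mem_cons]
    · intro i hi
      have hne : i ≠ a := fun he => hna (he ▸ hi)
      rcases h i (List.mem_cons_of_mem _ hi) with h1 | h1
      · left
        by_cases hc : tot.contains a = true
        · simp [hc, PySem.Dict.contains_modify, h1]
        · simp [hc, PySem.Dict.contains_insert, h1]
      · right
        rw [hstep i]
        simp [hne, h1]

lemma merge_step_keys (tot : PySem.Dict Int (List Int)) (kv : Int × Int) :
    (if tot.contains kv.1 then tot.modify kv.1 [] (fun v => v ++ [kv.2])
     else tot.insert kv.1 [kv.2]).keys = PySem.Set.add tot.keys kv.1 := by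
  by_cases hc : tot.contains kv.1 = true
  · have hm : kv.1 ∈ tot.keys := (PySem.Dict.contains_iff_mem_keys tot kv.1).mp hc
    have hc2 : (tot.insert kv.1 ((tot.getD kv.1 []) ++ [kv.2])).keys = tot.keys :=
      PySem.Dict.keys_insert_of_contains tot _ hc
    simp [hc, PySem.Dict.keys_modify, hc2, PySem.Set.add, PySem.Set.contains, hm]
  · have hm : kv.1 ∉ tot.keys := fun hmem => hc ((PySem.Dict.contains_iff_mem_keys tot kv.1).mpr hmem)
    simp [hc, PySem.Dict.keys_insert_of_not_contains tot _ (by simpa using hc),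
      PySem.Set.add, PySem.Set.contains, hm]

lemma merge_keys (pairs : List (Int × Int)) (tot : PySem.Dict Int (List Int)) :
    ((pairs.foldl (fun tot kv =>
        if tot.contains kv.1 then tot.modify kv.1 [] (fun v => v ++ [kv.2])
        else tot.insert kv.1 [kv.2]) tot)).keys
      = PySem.Set.update tot.keys (pairs.map (·.1)) := by
  induction pairs generalizing tot with
  | nil => simp [PySem.Set.update]
  | cons kv t ih =>
    simp only [List.foldl_cons, List.map_cons]
    rw [ih, merge_step_keys]
    simp [PySem.Set.update]

lemma merge_items (M : Int) (tot : PySem.Dict Int (List Int)) (F : Int → List Int) (c : List Int)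
    (htot : tot.items = (PySem.List.pyRange 1 (M + 1) 1).map (fun i => (i, F i))) :
    (((PySem.List.pyRange 1 (M + 1) 1).map (fun i => (i, pvCnt i c))).foldl (fun tot kv =>
        if tot.contains kv.1 then tot.modify kv.1 [] (fun v => v ++ [kv.2])
        else tot.insert kv.1 [kv.2]) tot).items
      = (PySem.List.pyRange 1 (M + 1) 1).map (fun i => (i, F i ++ [pvCnt i c])) := by
  set R := PySem.List.pyRange 1 (M + 1) 1 with hR
  have hRnd : R.Nodup := PySem.List.nodup_pyRange_one 1 (M + 1)
  have hkeys : tot.keys = R := by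
    simp [PySem.Dict.keys, htot, List.map_map, Function.comp_def]
  have hndk : tot.keys.Nodup := by rw [hkeys]; exact hRnd
  have hcont : ∀ i ∈ R, tot.contains i = true ∨ tot.getD i ([] : List Int) = [] := by
    intro i hi
    exact Or.inl ((PySem.Dict.contains_iff_mem_keys tot i).mpr (hkeys ▸ hi))
  set tot' := ((R.map (fun i => (i, pvCnt i c))).foldl (fun tot kv =>
      if tot.contains kv.1 then tot.modify kv.1 [] (fun v => v ++ [kv.2])
      else tot.insert kv.1 [kv.2]) tot) with htot'
  have hkeys' : tot'.keys = R := by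
    rw [htot', merge_keys]
    have : (R.map (fun i => (i, pvCnt i c))).map (·.1) = R := by
      simp [List.map_map, Function.comp_def]
    rw [this, hkeys, set_update_subset R R (fun x hx => hx)]
  have hnd' : tot'.keys.Nodup := by rw [hkeys']; exact hRnd
  rw [PySem.Dict.items_eq_map_keys tot' hnd' [], hkeys']
  apply List.map_eq_map_iff.mpr
  intro k hk
  have hgd : tot'.getD k [] = tot.getD k [] ++ [pvCnt k c] := by
    rw [htot', merge_getD R (fun i => pvCnt i c) tot k hRnd hcont]
    simp [hk]
  have hF : tot.getD k [] = F k := by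
    apply PySem.Dict.getD_of_mem_items tot (v := F k) ?_ hndk
    rw [htot]
    exact List.mem_map.mpr ⟨k, hk, rfl⟩
  simp [hgd, hF]

lemma A_outer (M : Int) (rest : List (List Int)) (F : Int → List Int)
    (tot : PySem.Dict Int (List Int))
    (hrest : ∀ c ∈ rest, c ≠ [] ∧ ∀ x ∈ c, |x| ≤ M ∧ x ≠ 0)
    (htot : tot.items = (PySem.List.pyRange 1 (M + 1) 1).map (fun i => (i, F i))) :
    (rest.foldl (fun tot c =>
        (count_LU_CN c M).items.foldl (fun tot kv =>
          if tot.contains kv.1 then tot.modify kv.1 [] (fun v => v ++ [kv.2])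
          else tot.insert kv.1 [kv.2]) tot) tot).items
      = (PySem.List.pyRange 1 (M + 1) 1).map
          (fun i => (i, F i ++ rest.map (fun c => pvCnt i c))) := by
  induction rest generalizing tot F with
  | nil => simpa using htot
  | cons c rest ih =>
    obtain ⟨hcne, hcbd⟩ := hrest c (by simp)
    simp only [List.foldl_cons]
    rw [A_count_items c M hcne (fun x hx => (hcbd x hx).1) (fun x hx => (hcbd x hx).2)]
    rw [ih (fun i => F i ++ [pvCnt i c]) _
        (fun c' hc' => hrest c' (List.mem_cons_of_mem _ hc'))
        (merge_items M tot F c htot)]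
    apply List.map_eq_map_iff.mpr
    intro k _
    simp

lemma A_final (Chrs : List (List Int)) (hpre : Pre_count_LU_CN_multi Chrs) :
    count_LU_CN_multi Chrs
      = (PySem.List.pyRange 1 (find_max_value Chrs + 1) 1).map
          (fun i => (i, Chrs.map (fun c => pvCnt i c))) := by
  cases Chrs with
  | nil => rfl
  | cons c rest =>
    obtain ⟨h0, hbd⟩ := find_max_value_bounds (c :: rest) (fun c' hc' => (hpre c' hc').1)
    set M := find_max_value (c :: rest) with hM
    set R := PySem.List.pyRange 1 (M + 1) 1 with hR
    have hRnd : R.Nodup := PySem.List.nodup_pyRange_one 1 (M + 1)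
    simp only [count_LU_CN_multi, List.foldl_cons]
    rw [A_count_items c M (hpre c (by simp)).1 (hbd c (by simp))
        (fun x hx => (hpre c (by simp)).2 x hx)]
    -- first chromosome: merged into the empty dict
    set tot1 := ((R.map (fun i => (i, pvCnt i c))).foldl (fun tot kv =>
        if tot.contains kv.1 then tot.modify kv.1 [] (fun v => v ++ [kv.2])
        else tot.insert kv.1 [kv.2]) (PySem.Dict.empty : PySem.Dict Int (List Int))) with htot1
    have hkeys1 : tot1.keys = R := by
      rw [htot1, merge_keys]
      have h1 : (R.map (fun i => (i, pvCnt i c))).map (·.1) = R := by simp [List.map_map, Function.comp_def]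
      rw [h1, PySem.Dict.keys_empty, set_update_append [] R hRnd (by simp)]
      simp
    have hnd1 : tot1.keys.Nodup := by rw [hkeys1]; exact hRnd
    have hitems1 : tot1.items = R.map (fun i => (i, [pvCnt i c])) := by
      rw [PySem.Dict.items_eq_map_keys tot1 hnd1 [], hkeys1]
      apply List.map_eq_map_iff.mpr
      intro k hk
      have : tot1.getD k [] = [pvCnt k c] := by
        rw [htot1, merge_getD R (fun i => pvCnt i c) _ k hRnd
            (fun i _ => Or.inr (PySem.Dict.getD_empty i []))]
        simp [PySem.Dict.getD_empty, hk]
      simp [this]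
    rw [A_outer M rest (fun i => [pvCnt i c]) tot1
        (fun c' hc' => ⟨(hpre c' (by simp [hc'])).1,
          fun x hx => ⟨hbd c' (by simp [hc']) x hx, (hpre c' (by simp [hc'])).2 x hx⟩⟩)
        hitems1]
    apply List.map_eq_map_iff.mpr
    intro k _
    simp

lemma B_inner_getD (c : List Int) (j : Nat) (d : PySem.Dict Int (List Int)) (k : Int) :
    (c.foldl (fun d x =>
        d.modify (|x|) [] (fun l => l.set j (l.getD j 0 + 1))) d).getD k []
      = (d.getD k []).set j ((d.getD k []).getD j 0 + pvCnt k c) := by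
  induction c generalizing d with
  | nil =>
    have h0 : pvCnt k ([] : List Int) = 0 := by simp [pvCnt]
    rw [List.foldl_nil, h0, add_zero, set_getD_self]
  | cons x t ih =>
    simp only [List.foldl_cons]
    rw [ih]
    by_cases hk : k = |x|
    · have hd' : (d.modify (|x|) [] (fun l => l.set j (l.getD j 0 + 1))).getD k []
          = (d.getD k []).set j ((d.getD k []).getD j 0 + 1) := by
        subst hk; rw [PySem.Dict.getD_modify_self]
      rw [hd']
      set l := d.getD k [] with hl
      have hcnt : pvCnt k (x :: t) = pvCnt k t + 1 := by
        have hbeq : (|x| == k) = true := by simp [hk]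
        simp only [pvCnt, List.map_cons, List.count_cons, hbeq, if_true]
        push_cast
        try ring
      by_cases hj : j < l.length
      · rw [List.set_set]
        have hgd : (l.set j (l.getD j 0 + 1)).getD j 0 = l.getD j 0 + 1 := by
          rw [List.getD_eq_getElem _ 0 (by simpa using hj)]
          simp [hj]
        rw [hgd, hcnt]
        first
        | rfl
        | (congr 1; ring)
      · have hset : ∀ v : Int, l.set j v = l := fun v => List.set_eq_of_length_le (by omega)
        simp [hset]
    · have hd' : (d.modify (|x|) [] (fun l => l.set j (l.getD j 0 + 1))).getD k []
          = d.getD k [] := by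
        rw [PySem.Dict.getD_modify]
        simp [hk]
      rw [hd']
      have hcnt : pvCnt k (x :: t) = pvCnt k t := by
        have hbeq : (|x| == k) = false := by
          simp only [beq_eq_false_iff_ne, ne_eq]
          exact fun h => hk h.symm
        simp [pvCnt, List.count_cons, hbeq]
      rw [hcnt]

lemma B_outer_getD (cs : List (List Int)) (s : Int) (hs : 0 ≤ s)
    (d : PySem.Dict Int (List Int)) (k : Int) :
    ((PySem.List.enumerate cs s).foldl (fun d p =>
        p.2.foldl (fun d x =>
          d.modify (|x|) [] (fun l => l.set p.1.toNat (l.getD p.1.toNat 0 + 1))) d) d).getD k []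
      = pvFill k cs s.toNat (d.getD k []) := by
  induction cs generalizing s d with
  | nil => simp [PySem.List.enumerate, pvFill]
  | cons c rest ih =>
    rw [PySem.List.enumerate_cons]
    simp only [List.foldl_cons]
    have hsucc : (s + 1).toNat = s.toNat + 1 := by omega
    rw [ih (s + 1) (by omega), B_inner_getD, hsucc]
    rfl

lemma pvFill_spec (k : Int) (cs : List (List Int)) (pre : List Int) :
    pvFill k cs pre.length (pre ++ List.replicate cs.length 0)
      = pre ++ cs.map (fun c => pvCnt k c) := by
  induction cs generalizing pre with
  | nil => simp [pvFill]
  | cons c rest ih =>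
    simp only [List.length_cons, List.replicate_succ]
    show pvFill k rest (pre.length + 1)
        ((pre ++ 0 :: List.replicate rest.length 0).set pre.length
          ((pre ++ 0 :: List.replicate rest.length 0).getD pre.length 0 + pvCnt k c))
      = pre ++ pvCnt k c :: rest.map (fun c => pvCnt k c)
    have hg : (pre ++ 0 :: List.replicate rest.length 0).getD pre.length 0 = 0 := by
      simp [List.getD]
    rw [hg, set_append_len, zero_add]
    have h1 : pre ++ pvCnt k c :: List.replicate rest.length 0
        = (pre ++ [pvCnt k c]) ++ List.replicate rest.length 0 := by simp
    have h2 : pre.length + 1 = (pre ++ [pvCnt k c]).length := by simp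
    rw [h1, h2, ih (pre ++ [pvCnt k c])]
    simp

lemma B_keys (cs : List (List Int)) (s : Int) (d : PySem.Dict Int (List Int)) :
    ((PySem.List.enumerate cs s).foldl (fun d p =>
        p.2.foldl (fun d x =>
          d.modify (|x|) [] (fun l => l.set p.1.toNat (l.getD p.1.toNat 0 + 1))) d) d).keys
      = PySem.Set.update d.keys (cs.map pvAbsList).flatten := by
  induction cs generalizing s d with
  | nil => simp [PySem.List.enumerate, PySem.Set.update]
  | cons c rest ih =>
    rw [PySem.List.enumerate_cons]
    simp only [List.foldl_cons]
    rw [ih]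
    rw [PySem.Dict.keys_foldl_modify_key c (fun x => |x|) []
        (fun _ _ => (fun l => l.set s.toNat (l.getD s.toNat 0 + 1))) d]
    rw [set_update_update]
    simp [pvAbsList]

lemma B_final (Chrs : List (List Int)) (hpre : Pre_count_LU_CN_multi Chrs) :
    count_LU_CN_multi_alt Chrs
      = (PySem.List.pyRange 1 (find_max_value Chrs + 1) 1).map
          (fun i => (i, Chrs.map (fun c => pvCnt i c))) := by
  obtain ⟨h0, hbd⟩ := find_max_value_bounds Chrs (fun c' hc' => (hpre c' hc').1)
  have hM : (Chrs.foldl (fun mx Chr =>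
      let m := pvMaxAbsB Chr
      if m > mx then m else mx) 0) = find_max_value Chrs := rfl
  simp only [count_LU_CN_multi_alt, hM]
  set M := find_max_value Chrs with hMdef
  set R := PySem.List.pyRange 1 (M + 1) 1 with hR
  have hRnd : R.Nodup := PySem.List.nodup_pyRange_one 1 (M + 1)
  set N := Chrs.length with hN
  set tot0 := (R.foldl (fun d i => d.insert i (List.replicate N (0 : Int)))
      (PySem.Dict.empty : PySem.Dict Int (List Int))) with htot0
  have htot0items : tot0.items = R.map (fun i => (i, List.replicate N (0 : Int))) := by
    rw [htot0, PySem.Dict.items_foldl_insert_fresh R (fun i => i) (fun _ => List.replicate N (0 : Int)) _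
        (by intro a _; exact PySem.Dict.contains_empty _) (by simpa using hRnd)]
    simp [dict_items_empty]
  have htot0keys : tot0.keys = R := by
    simp [PySem.Dict.keys, htot0items, List.map_map, Function.comp_def]
  have htot0nd : tot0.keys.Nodup := by rw [htot0keys]; exact hRnd
  set tf := ((PySem.List.enumerate Chrs 0).foldl (fun d p =>
      p.2.foldl (fun d x =>
        d.modify (|x|) [] (fun l => l.set p.1.toNat (l.getD p.1.toNat 0 + 1))) d) tot0) with htf
  have hfkeys : tf.keys = R := by
    rw [htf, B_keys, htot0keys, set_update_subset]
    intro y hy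
    simp only [List.mem_flatten, List.mem_map] at hy
    obtain ⟨l, ⟨c', hc', rfl⟩, hyl⟩ := hy
    simp only [pvAbsList, List.mem_map] at hyl
    obtain ⟨x, hx, rfl⟩ := hyl
    rw [hR, PySem.List.mem_pyRange_one]
    have h1 := hbd c' hc' x hx
    have h2 : 0 < |x| := abs_pos.mpr ((hpre c' hc').2 x hx)
    constructor <;> omega
  have hfnd : tf.keys.Nodup := by rw [hfkeys]; exact hRnd
  rw [PySem.Dict.items_eq_map_keys tf hfnd [], hfkeys]
  apply List.map_eq_map_iff.mpr
  intro k hk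
  have hg0 : tot0.getD k [] = List.replicate N (0 : Int) := by
    apply PySem.Dict.getD_of_mem_items tot0 (v := List.replicate N (0 : Int)) ?_ htot0nd
    rw [htot0items]
    exact List.mem_map.mpr ⟨k, hk, rfl⟩
  have hgf : tf.getD k [] = Chrs.map (fun c => pvCnt k c) := by
    rw [htf, B_outer_getD Chrs 0 (le_refl 0), hg0]
    have : (0 : Int).toNat = ([] : List Int).length := rfl
    rw [this]
    have hrepl : List.replicate N (0 : Int) = [] ++ List.replicate Chrs.length (0 : Int) := by
      simp [hN]
    rw [hrepl, pvFill_spec]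
    simp
  simp [hgf]

-- ===== VERDICT (by name: the statement is the Claim_ definition above) =====
theorem count_LU_CN_multi_spec : Claim_equal_count_LU_CN_multi := by
  intro Chrs _ hpre
  unfold Spec_count_LU_CN_multi
  rw [A_final Chrs hpre, B_final Chrs hpre]
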